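-- pv_equiv track=rewrite | github.com/negedng/NLP | hyphenation/trainer_hu_en.py | hyp_inserted
-- ===== SOURCE A (Python) =====
-- def hyp_inserted(word, tags, tag_chars='BM'):
--     """insert hyphen to the tags"""
--     assert len(word)<=len(tags)
--     s = ""
--     for c in range(len(word)):
--         if (c!=0) and tags[c]=='B':
--             s+='-'
--         s+=word[c]
--     return s
-- ===== SOURCE B (Python) =====
-- def hyp_inserted(word, tags, tag_chars='BM'):
--     """insert hyphen to the tags"""
--     assert len(word) <= len(tags)
--     boundaries = [i for i in range(len(word)) if i != 0 and tags[i] == 'B']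
--     pieces = []
--     prev = 0
--     for b in boundaries:
--         pieces.append(word[prev:b])
--         prev = b
--     pieces.append(word[prev:])
--     return '-'.join(pieces)
-- ===== Notes on version B (the rewrite author's own statement) =====
-- stated objective: alternative
-- what changed: Replaces A's single pass of per-character string concatenation with a two-pass decomposition: first build the list of boundary indices (i != 0 and tags[i] == 'B'), then slice the word at those boundaries and '-'.join the pieces.
import Mathlib
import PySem

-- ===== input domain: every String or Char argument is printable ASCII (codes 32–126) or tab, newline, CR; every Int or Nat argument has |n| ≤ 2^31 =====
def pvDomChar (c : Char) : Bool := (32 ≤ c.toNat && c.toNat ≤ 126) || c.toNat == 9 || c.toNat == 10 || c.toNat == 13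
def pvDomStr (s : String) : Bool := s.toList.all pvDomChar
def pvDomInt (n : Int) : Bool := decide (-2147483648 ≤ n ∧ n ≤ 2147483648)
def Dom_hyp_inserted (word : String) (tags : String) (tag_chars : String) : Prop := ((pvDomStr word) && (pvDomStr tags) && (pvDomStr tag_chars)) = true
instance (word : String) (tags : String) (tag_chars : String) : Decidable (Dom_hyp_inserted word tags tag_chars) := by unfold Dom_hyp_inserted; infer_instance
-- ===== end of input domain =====

-- B replaces A's per-character accumulation by a boundary-index table then slice-and-join decomposition (objective: alternative, same cost).
-- Both Pythons raise AssertionError when len(word) > len(tags); Pre_ excludes exactly those inputs.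

-- ===== PORT A =====
-- A loops c over range(len(word)), appending '-' before word[c] whenever c != 0 and tags[c] == 'B'.
-- Indices are always in range inside Pre_ (c < len(word) ≤ len(tags)), so getD's default is never used there.
def hyp_inserted (word : String) (tags : String) (tag_chars : String) : String :=
  let w := word.toList
  let t := tags.toList
  String.mk ((List.range w.length).foldl
    (fun s c => (if c ≠ 0 ∧ t.getD c ' ' = 'B' then s ++ ['-'] else s) ++ [w.getD c ' ']) [])

-- ===== PORT B =====
-- word[prev:b] with 0 ≤ prev ≤ b ≤ len(word): exactly (w.drop prev).take (b - prev); word[prev:] = w.drop prev.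
def hypPieces (w : List Char) (prev : Nat) : List Nat → List (List Char)
  | [] => [w.drop prev]
  | b :: rest => (w.drop prev).take (b - prev) :: hypPieces w b rest

-- '-'.join(pieces)
def hypJoin : List (List Char) → List Char
  | [] => []
  | [p] => p
  | p :: ps => p ++ '-' :: hypJoin ps

def hyp_inserted_alt (word : String) (tags : String) (tag_chars : String) : String :=
  let w := word.toList
  let t := tags.toList
  let boundaries := (List.range w.length).filter (fun i => decide (i ≠ 0 ∧ t.getD i ' ' = 'B'))
  String.mk (hypJoin (hypPieces w 0 boundaries))

-- ===== PRECONDITION & SPEC =====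
-- Pre_: the assert at the top of both programs; A raises AssertionError iff len(word) > len(tags).
def Pre_hyp_inserted (word : String) (tags : String) (tag_chars : String) : Prop :=
  word.toList.length ≤ tags.toList.length
instance (word : String) (tags : String) (tag_chars : String) : Decidable (Pre_hyp_inserted word tags tag_chars) := by unfold Pre_hyp_inserted; infer_instance

def pvWitness_hyp_inserted : String × String × String := ("almafa", "BMMBMM", "BM")

def Spec_hyp_inserted (word : String) (tags : String) (tag_chars : String) (out : String) : Prop := out = hyp_inserted_alt word tags tag_chars
instance (word : String) (tags : String) (tag_chars : String) (out : String) : Decidable (Spec_hyp_inserted word tags tag_chars out) := by unfold Spec_hyp_inserted; infer_instance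

-- ===== CLAIM (what is proved, stated in full; the proofs are below) =====
def Claim_equal_hyp_inserted : Prop := ∀ (word : String) (tags : String) (tag_chars : String), Dom_hyp_inserted word tags tag_chars → Pre_hyp_inserted word tags tag_chars → Spec_hyp_inserted word tags tag_chars (hyp_inserted word tags tag_chars)

-- ===== LEMMAS AND PROOFS =====

theorem hypPieces_ne_nil (w : List Char) (prev : Nat) (bs : List Nat) :
    hypPieces w prev bs ≠ [] := by
  cases bs <;> simp [hypPieces]

theorem hypJoin_cons (p : List Char) (ps : List (List Char)) (h : ps ≠ []) :
    hypJoin (p :: ps) = p ++ '-' :: hypJoin ps := by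
  cases ps with
  | nil => exact absurd rfl h
  | cons q qs => rfl

-- extending the word past every boundary only appends to the last piece
theorem hypJoin_pieces_take (w : List Char) (m : Nat) :
    ∀ (bs : List Nat) (prev : Nat), (∀ b ∈ bs, b ≤ m) → prev ≤ m →
      hypJoin (hypPieces w prev bs) = hypJoin (hypPieces (w.take m) prev bs) ++ w.drop m := by
  intro bs
  induction bs with
  | nil =>
      intro prev _ hprev
      simp [hypPieces, hypJoin, List.drop_take]
      rw [show w.drop m = ((w.drop prev).drop (m - prev)) by
            rw [List.drop_drop]; congr 1; omega]
      exact (List.take_append_drop _ _).symm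
  | cons b rest ih =>
      intro prev hb hprev
      have hbm : b ≤ m := hb b (by simp)
      have hhead : ((w.take m).drop prev).take (b - prev) = (w.drop prev).take (b - prev) := by
        rw [List.drop_take, List.take_take]
        congr 1; omega
      rw [hypPieces, hypPieces,
        hypJoin_cons _ _ (hypPieces_ne_nil _ _ _),
        hypJoin_cons _ _ (hypPieces_ne_nil _ _ _),
        hhead, ih b (fun x hx => hb x (by simp [hx])) hbm]
      simp

-- adding a final boundary m splits off the tail w.drop m with a hyphen
theorem hypJoin_pieces_snoc (w : List Char) (m : Nat) :
    ∀ (bs : List Nat) (prev : Nat), (∀ b ∈ bs, b ≤ m) → prev ≤ m →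
      hypJoin (hypPieces w prev (bs ++ [m])) =
        hypJoin (hypPieces (w.take m) prev bs) ++ '-' :: w.drop m := by
  intro bs
  induction bs with
  | nil =>
      intro prev _ hprev
      simp [hypPieces, hypJoin, List.drop_take]
  | cons b rest ih =>
      intro prev hb hprev
      have hbm : b ≤ m := hb b (by simp)
      have hhead : ((w.take m).drop prev).take (b - prev) = (w.drop prev).take (b - prev) := by
        rw [List.drop_take, List.take_take]
        congr 1; omega
      rw [List.cons_append, hypPieces, hypPieces,
        hypJoin_cons _ _ (by exact hypPieces_ne_nil _ _ _),
        hypJoin_cons _ _ (hypPieces_ne_nil _ _ _),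
        hhead, ih b (fun x hx => hb x (by simp [hx])) hbm]
      simp

theorem hyp_core (w t : List Char) :
    ∀ n, n ≤ w.length →
      (List.range n).foldl
        (fun s c => (if c ≠ 0 ∧ t.getD c ' ' = 'B' then s ++ ['-'] else s) ++ [w.getD c ' ']) [] =
      hypJoin (hypPieces (w.take n) 0
        ((List.range n).filter (fun i => decide (i ≠ 0 ∧ t.getD i ' ' = 'B')))) := by
  intro n
  induction n with
  | zero => simp [hypPieces, hypJoin]
  | succ n ih =>
      intro hn
      have hn' : n ≤ w.length := Nat.le_of_succ_le hn
      have hlt : n < w.length := hn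
      have hbs : ∀ b ∈ (List.range n).filter (fun i => decide (i ≠ 0 ∧ t.getD i ' ' = 'B')), b ≤ n := by
        intro b hb
        have := List.mem_range.mp (List.mem_of_mem_filter hb)
        omega
      have htk : (w.take (n + 1)).take n = w.take n := by
        rw [List.take_take]; congr 1; omega
      have hdr : (w.take (n + 1)).drop n = [w.getD n ' '] := by
        rw [List.take_succ, List.drop_append_of_le_length (by simp; omega)]
        have : (w.take n).drop n = [] := by simp
        rw [this, List.nil_append]
        simp [List.getElem?_eq_getElem hlt, List.getD_eq_getElem?_getD,
          List.getElem?_eq_getElem hlt]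
      rw [List.range_succ, List.foldl_append, List.filter_append, ih hn']
      simp only [List.foldl_cons, List.foldl_nil, List.filter_cons, List.filter_nil]
      by_cases hc : n ≠ 0 ∧ t.getD n ' ' = 'B'
      · rw [if_pos hc, decide_eq_true hc, if_pos rfl,
          hypJoin_pieces_snoc (w.take (n+1)) n _ 0 hbs (Nat.zero_le n), htk, hdr]
        simp
      · rw [if_neg hc, decide_eq_false hc, if_neg Bool.false_ne_true, List.append_nil,
          hypJoin_pieces_take (w.take (n+1)) n _ 0 hbs (Nat.zero_le n), htk, hdr]

-- ===== VERDICT (by name: the statement is the Claim_ definition above) =====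
theorem hyp_inserted_spec : Claim_equal_hyp_inserted := by
  intro word tags tag_chars _ _
  unfold Spec_hyp_inserted hyp_inserted hyp_inserted_alt
  have h := hyp_core word.toList tags.toList word.toList.length (Nat.le_refl _)
  simp only [List.take_length] at h
  exact congrArg String.mk h
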